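-- pv_equiv track=rewrite | github.com/Huevaldinho/Tarea-programada-1 | funciones.py | procesarSufamelico
-- ===== SOURCE A (Python) =====
-- def procesarSufamelico(texto):
--     """
--     Función: Codificar/decodificar el texto a Sufamelico.
--     Entrada:
--     -texto(str): Texto a codificar/decodificar.
--     Salida: N/A
--     """
--     lista=[["S","U"],["U","S"],["F","A"],["A","F"],["M","E"],["E","M"],["L","I"],["I","L"],["C","O"],["O","C"],]#lista para ir cambiando letras.
--     todo=["S","U","F","A","M","E","L","I","C","O"]#si la letra no está aqui no va a cambiarlo.
--     final=""#codificado/decodificado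
--     for letra in texto:#saca letra del texto para comparar con todas las sublistas.
--         for sublista in lista: #saca todas las sublistas para buscar la letra en la posición 0 para cambiarla por la 1.
--             if not letra in todo:#si la letra que tiene no es alguna de las que cambia, peguela y siga con la otra letra.
--                 final+=letra#pega letra que no tiene otra para cambiar.
--                 break#pasa a la siguiete letra del for.
--             elif sublista[0]==letra:#si la letra que tiene coincide con alguna sublista en la posición 0.
--                 final+=sublista[1]#pegue la letra 1 de la sublista.
--                 break#pase a la siguiente
--     return final
-- ===== SOURCE B (Python) =====
-- _TABLE = str.maketrans("SUFAMELICO", "USAFEMILOC")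
--
-- def procesarSufamelico(texto):
--     return texto.translate(_TABLE)
-- ===== Notes on version B (the rewrite author's own statement) =====
-- stated objective: idiomatic
-- what changed: Replaced the per-character nested scan over substitution sublists (with breaks) by a translation table built once with str.maketrans and a single texto.translate call (one builtin pass, no Python-level loops).
import Mathlib
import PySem

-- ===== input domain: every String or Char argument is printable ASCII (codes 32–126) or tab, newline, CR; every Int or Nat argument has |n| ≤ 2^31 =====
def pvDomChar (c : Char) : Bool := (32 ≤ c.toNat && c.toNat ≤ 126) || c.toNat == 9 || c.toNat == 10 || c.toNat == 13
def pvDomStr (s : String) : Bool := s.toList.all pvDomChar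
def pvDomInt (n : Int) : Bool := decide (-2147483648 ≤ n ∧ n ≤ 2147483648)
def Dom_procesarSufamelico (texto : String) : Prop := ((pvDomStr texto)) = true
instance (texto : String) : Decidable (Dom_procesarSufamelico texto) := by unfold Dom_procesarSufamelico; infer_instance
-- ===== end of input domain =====

-- B replaces A's per-character nested scan over substitution sublists (with break) by a
-- translation table built once and a single pass mapping each character through it (idiomatic).

-- ===== PORT A =====
-- the fixed list of [from, to] sublists (each sublista has exactly two letters → a pair)
def pvListaA : List (Char × Char) :=
  [('S','U'),('U','S'),('F','A'),('A','F'),('M','E'),('E','M'),('L','I'),('I','L'),('C','O'),('O','C')]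
-- the letters that get changed
def pvTodoA : List Char := ['S','U','F','A','M','E','L','I','C','O']

-- inner 'for sublista in lista' loop with its breaks, threading the accumulator 'final'
def pvInnerA : List (Char × Char) → Char → String → String
  | [], _, final => final
  | (a, b) :: rest, letra, final =>
    if ¬ (letra ∈ pvTodoA) then final ++ String.ofList [letra]
    else if a == letra then final ++ String.ofList [b]
    else pvInnerA rest letra final

def procesarSufamelico (texto : String) : String :=
  texto.toList.foldl (fun final letra => pvInnerA pvListaA letra final) ""

-- ===== PORT B =====
-- the translation table built once from the two strings (str.maketrans)
def pvTableB : PySem.Dict Char Char :=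
  PySem.Dict.ofList (List.zip "SUFAMELICO".toList "USAFEMILOC".toList)

def procesarSufamelico_alt (texto : String) : String :=
  String.ofList (texto.toList.map (fun c => pvTableB.getD c c))

-- ===== PRECONDITION & SPEC =====
def Spec_procesarSufamelico (texto : String) (out : String) : Prop := out = procesarSufamelico_alt texto
instance (texto : String) (out : String) : Decidable (Spec_procesarSufamelico texto out) := by unfold Spec_procesarSufamelico; infer_instance

-- ===== CLAIM (what is proved, stated in full; the proofs are below) =====
def Claim_equal_procesarSufamelico : Prop := ∀ (texto : String), Dom_procesarSufamelico texto → Spec_procesarSufamelico texto (procesarSufamelico texto)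

-- ===== LEMMAS AND PROOFS =====

-- per-character agreement: A's inner loop appends exactly B's table image of the character
theorem pvStep_eq (c : Char) (final : String) :
    pvInnerA pvListaA c final = final ++ String.ofList [pvTableB.getD c c] := by
  by_cases h : c ∈ pvTodoA
  · simp only [pvTodoA, List.mem_cons, List.not_mem_nil, or_false] at h
    rcases h with rfl | rfl | rfl | rfl | rfl | rfl | rfl | rfl | rfl | rfl <;>
      simp [pvInnerA, pvListaA, pvTodoA] <;> decide
  · have e : pvTableB = PySem.Dict.mk
        [('S','U'),('U','S'),('F','A'),('A','F'),('M','E'),('E','M'),('L','I'),('I','L'),('C','O'),('O','C')] := by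
      decide
    simp only [pvTodoA, List.mem_cons, List.not_mem_nil, or_false, not_or] at h
    obtain ⟨h1,h2,h3,h4,h5,h6,h7,h8,h9,h10⟩ := h
    have ht : pvTableB.getD c c = c := by
      simp [e, PySem.Dict.getD, beq_iff_eq,
        Ne.symm h1, Ne.symm h2, Ne.symm h3, Ne.symm h4, Ne.symm h5,
        Ne.symm h6, Ne.symm h7, Ne.symm h8, Ne.symm h9, Ne.symm h10, PySem.Dict.get?]
    rw [ht]
    have hnot : ¬ (c ∈ pvTodoA) := by
      simp [pvTodoA, h1,h2,h3,h4,h5,h6,h7,h8,h9,h10]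
    simp [pvInnerA, pvListaA, hnot]

theorem pvFold_eq (l : List Char) (final : String) :
    l.foldl (fun final letra => pvInnerA pvListaA letra final) final
      = final ++ String.ofList (l.map (fun c => pvTableB.getD c c)) := by
  induction l generalizing final with
  | nil => simp
  | cons c rest ih =>
    rw [List.foldl_cons, pvStep_eq, ih]
    rw [String.append_assoc, ← String.ofList_append]
    simp

-- ===== VERDICT (by name: the statement is the Claim_ definition above) =====
theorem procesarSufamelico_spec : Claim_equal_procesarSufamelico := by
  intro texto _
  unfold Spec_procesarSufamelico procesarSufamelico procesarSufamelico_alt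
  rw [pvFold_eq]
  simp
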